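-- pv_equiv track=rewrite | github.com/naomiblkr/doc-mt-metrics-eval-public | GPT_doc_metric/get_prompts.py | add_context
-- ===== SOURCE A (Python) =====
-- from typing import List, Dict
--
-- def add_context(orig_txt: List[str], context: List[str], doc_ids: List[str], window: int) -> List[str]:
--     '''Add n preceeding context sentences to each sentence.'''
--     assert len(orig_txt) == len(context)
--     i, n = 0, 0
--     augm_txt = []
--     doc_id = doc_ids[0]
--     while i < len(orig_txt):
--         if doc_ids[i] == doc_id:
--             context_window = context[i - min(n, window):i]
--             augm_txt.append(' '.join(context_window + [orig_txt[i]]))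
--             i += 1
--         else:
--             doc_id = doc_ids[i]
--             # add last two sentences and last sentence again, as not to weight them less
--             # this makes augmented text longer than the original
--             #augm_txt.append(context[i-2] + ' ' + orig_txt[i-1])
--             #augm_txt.append(orig_txt[i-1])
--             n = -1
--         n += 1
--     return augm_txt
-- ===== SOURCE B (Python) =====
-- def add_context(orig_txt, context, doc_ids, window):
--     '''Add n preceeding context sentences to each sentence.'''
--     assert len(orig_txt) == len(context)
--     # pass 1: start index of the consecutive same-doc run containing each sentence
--     starts = []
--     run_start = 0
--     for i in range(len(orig_txt)):
--         if i > 0 and doc_ids[i] != doc_ids[i - 1]: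
--             run_start = i
--         starts.append(run_start)
--     # pass 2: per-sentence window slice, clipped at the run start
--     return [' '.join(context[max(s, i - window):i] + [orig_txt[i]])
--             for i, s in enumerate(starts)]
-- ===== Notes on version B (the rewrite author's own statement) =====
-- stated objective: simpler
-- what changed: A's single counter-driven while loop (which re-visits boundary indices and resets via n = -1) is replaced by two clean passes: first precompute each sentence's consecutive-run start index, then build each augmented sentence with one slice context[max(run_start, i-window):i].
import Mathlib
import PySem

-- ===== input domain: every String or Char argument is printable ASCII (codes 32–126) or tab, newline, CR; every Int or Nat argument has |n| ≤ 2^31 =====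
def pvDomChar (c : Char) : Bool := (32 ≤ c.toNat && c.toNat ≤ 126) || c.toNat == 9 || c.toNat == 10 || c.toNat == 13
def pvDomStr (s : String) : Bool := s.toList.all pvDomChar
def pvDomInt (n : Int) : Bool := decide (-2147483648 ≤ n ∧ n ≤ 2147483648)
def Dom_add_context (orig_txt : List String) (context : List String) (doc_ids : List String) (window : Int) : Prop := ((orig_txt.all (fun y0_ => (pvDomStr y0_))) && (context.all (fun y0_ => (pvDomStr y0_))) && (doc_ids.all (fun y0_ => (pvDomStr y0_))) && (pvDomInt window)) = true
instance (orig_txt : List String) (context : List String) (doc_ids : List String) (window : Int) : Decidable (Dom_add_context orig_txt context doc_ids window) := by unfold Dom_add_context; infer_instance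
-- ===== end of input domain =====

-- B replaces A's one-pass counter-driven while loop (with boundary re-visiting and the
-- n = -1 trick) by two clean passes: precompute each sentence's run-start index, then
-- build each augmented sentence by one slice; objective: simpler.

-- ===== PORT A =====
-- the while loop; fuel bounds the number of iterations (each index is visited at most
-- twice, so 2*len+1 fuel is always enough); n += 1 at the end of the body is folded
-- into the two recursive calls (match: n+1; else: n = -1 then +1, i.e. 0)
def addCtxLoop (orig_txt : List String) (context : List String) (doc_ids : List String)
    (window : Int) : Nat → Int → Int → String → List String → List String
  | 0, _, _, _, acc => acc
  | fuel+1, i, n, doc_id, acc =>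
    if i < (orig_txt.length : Int) then
      if PySem.List.pyGetD doc_ids i "" = doc_id then
        let context_window := PySem.List.slice context (some (i - min n window)) (some i)
        addCtxLoop orig_txt context doc_ids window fuel (i+1) (n+1) doc_id
          (acc ++ [PySem.Str.join " " (context_window ++ [PySem.List.pyGetD orig_txt i ""])])
      else
        addCtxLoop orig_txt context doc_ids window fuel i 0
          (PySem.List.pyGetD doc_ids i "") acc
    else acc

def add_context (orig_txt : List String) (context : List String) (doc_ids : List String)
    (window : Int) : List String :=
  addCtxLoop orig_txt context doc_ids window (2 * orig_txt.length + 1) 0 0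
    (PySem.List.pyGetD doc_ids 0 "") []

-- ===== PORT B =====
-- pass 1 of Source B: build the list of run-start indices
def altStarts (orig_txt : List String) (doc_ids : List String) : List Int :=
  ((List.range orig_txt.length).foldl (fun (p : List Int × Int) (i : Nat) =>
      let rs := if 0 < i ∧ PySem.List.pyGetD doc_ids (i : Int) "" ≠ PySem.List.pyGetD doc_ids ((i : Int) - 1) ""
                then (i : Int) else p.2
      (p.1 ++ [rs], rs)) ([], 0)).1

def add_context_alt (orig_txt : List String) (context : List String) (doc_ids : List String)
    (window : Int) : List String :=
  (PySem.List.enumerate (altStarts orig_txt doc_ids) 0).map (fun p =>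
    PySem.Str.join " " (PySem.List.slice context (some (max p.2 (p.1 - window))) (some p.1)
      ++ [PySem.List.pyGetD orig_txt p.1 ""]))

-- ===== PRECONDITION & SPEC =====
-- Pre_ excludes exactly the inputs on which Python A raises: the assert needs
-- len(orig_txt) == len(context); doc_ids[0] and doc_ids[i] for i < len(orig_txt)
-- need doc_ids nonempty and at least as long as orig_txt.
def Pre_add_context (orig_txt : List String) (context : List String) (doc_ids : List String) (window : Int) : Prop :=
  context.length = orig_txt.length ∧ orig_txt.length ≤ doc_ids.length ∧ doc_ids ≠ []
instance (orig_txt : List String) (context : List String) (doc_ids : List String) (window : Int) : Decidable (Pre_add_context orig_txt context doc_ids window) := by unfold Pre_add_context; infer_instance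

def pvWitness_add_context : List String × List String × List String × Int :=
  (["s0", "s1", "s2"], ["c0", "c1", "c2"], ["d1", "d1", "d2"], 2)

def Spec_add_context (orig_txt : List String) (context : List String) (doc_ids : List String) (window : Int) (out : List String) : Prop := out = add_context_alt orig_txt context doc_ids window
instance (orig_txt : List String) (context : List String) (doc_ids : List String) (window : Int) (out : List String) : Decidable (Spec_add_context orig_txt context doc_ids window out) := by unfold Spec_add_context; infer_instance

-- ===== CLAIM (what is proved, stated in full; the proofs are below) =====
def Claim_equal_add_context : Prop := ∀ (orig_txt : List String) (context : List String) (doc_ids : List String) (window : Int), Dom_add_context orig_txt context doc_ids window → Pre_add_context orig_txt context doc_ids window → Spec_add_context orig_txt context doc_ids window (add_context orig_txt context doc_ids window)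


-- ===== LEMMAS AND PROOFS =====

-- doc id at index j (total, via pyGetD, as both ports read it)
def idAt (doc_ids : List String) (j : Nat) : String := PySem.List.pyGetD doc_ids (j : Int) ""

-- start index of the consecutive same-doc run containing index j
def startF (doc_ids : List String) : Nat → Nat
  | 0 => 0
  | j+1 => if idAt doc_ids (j+1) = idAt doc_ids j then startF doc_ids j else j+1

-- the j-th output sentence, as B computes it
def elemAt (orig_txt : List String) (context : List String) (doc_ids : List String)
    (window : Int) (j : Nat) : String :=
  PySem.Str.join " " (PySem.List.slice context
      (some (max ((startF doc_ids j : Nat) : Int) ((j : Int) - window))) (some (j : Int))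
    ++ [PySem.List.pyGetD orig_txt (j : Int) ""])

lemma startF_le (doc_ids : List String) (j : Nat) : startF doc_ids j ≤ j := by
  induction j with
  | zero => simp [startF]
  | succ k ih => unfold startF; split <;> omega

lemma altStarts_fold (doc_ids : List String) :
    ∀ m : Nat, (List.range m).foldl (fun (p : List Int × Int) (i : Nat) =>
      let rs := if 0 < i ∧ PySem.List.pyGetD doc_ids (i : Int) "" ≠ PySem.List.pyGetD doc_ids ((i : Int) - 1) ""
                then (i : Int) else p.2
      (p.1 ++ [rs], rs)) ([], 0)
      = ((List.range m).map (fun j => ((startF doc_ids j : Nat) : Int)), ((startF doc_ids (m - 1) : Nat) : Int)) := by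
  intro m
  induction m with
  | zero => simp [startF]
  | succ k ih =>
    rw [List.range_succ, List.foldl_append, ih, List.map_append]
    simp only [List.foldl_cons, List.foldl_nil, List.map_cons, List.map_nil]
    have hstart : (if 0 < k ∧ PySem.List.pyGetD doc_ids (k : Int) "" ≠ PySem.List.pyGetD doc_ids ((k : Int) - 1) ""
        then (k : Int) else ((startF doc_ids (k - 1) : Nat) : Int)) = ((startF doc_ids k : Nat) : Int) := by
      cases k with
      | zero => simp [startF]
      | succ j =>
        have h1 : ((j + 1 : Nat) : Int) - 1 = (j : Int) := by push_cast; omega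
        by_cases h : PySem.List.pyGetD doc_ids ((j + 1 : Nat) : Int) "" = PySem.List.pyGetD doc_ids (j : Int) ""
        · simp [startF, idAt]
        · simp [startF, idAt]
    rw [hstart]
    simp

lemma enumerate_append {α : Type} (xs ys : List α) (s : Int) :
    PySem.List.enumerate (xs ++ ys) s = PySem.List.enumerate xs s ++ PySem.List.enumerate ys (s + xs.length) := by
  induction xs generalizing s with
  | nil => simp [PySem.List.enumerate_nil]
  | cons x xs ih =>
    simp only [List.cons_append, PySem.List.enumerate_cons, ih, List.length_cons]
    congr 2
    push_cast
    ring

lemma alt_eq_map (orig_txt context doc_ids : List String) (window : Int) :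
    add_context_alt orig_txt context doc_ids window
      = (List.range orig_txt.length).map (elemAt orig_txt context doc_ids window) := by
  unfold add_context_alt altStarts
  rw [altStarts_fold]
  generalize orig_txt.length = m
  induction m with
  | zero => simp [PySem.List.enumerate_nil]
  | succ k ih =>
    rw [List.range_succ, List.map_append, enumerate_append, List.map_append, ih, List.map_append]
    simp [PySem.List.enumerate_cons, PySem.List.enumerate_nil, elemAt]

-- invariant-based correctness of A's while loop
lemma loopA_eq (orig_txt context doc_ids : List String) (window : Int) :
    ∀ (fuel : Nat) (i : Nat) (n : Int) (doc_id : String) (acc : List String),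
      i ≤ orig_txt.length →
      ((doc_id = idAt doc_ids i ∧ n = (i : Int) - (startF doc_ids i : Nat) ∧
          2 * (orig_txt.length - i) ≤ fuel + 1) ∨
       (0 < i ∧ doc_id = idAt doc_ids (i - 1) ∧ doc_id ≠ idAt doc_ids i ∧
          2 * (orig_txt.length - i) + 1 ≤ fuel + 1)) →
      addCtxLoop orig_txt context doc_ids window fuel (i : Int) n doc_id acc
        = acc ++ (List.range' i (orig_txt.length - i)).map (elemAt orig_txt context doc_ids window) := by
  intro fuel
  induction fuel with
  | zero =>
    intro i n doc_id acc hle hinv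
    have : orig_txt.length - i = 0 := by omega
    rw [this]
    simp [addCtxLoop]
  | succ f ih =>
    intro i n doc_id acc hle hinv
    by_cases hi : i < orig_txt.length
    · have hiInt : (i : Int) < (orig_txt.length : Int) := by exact_mod_cast hi
      rcases hinv with ⟨hid, hn, hf⟩ | ⟨hpos, hid, hne, hf⟩
      · -- aligned: the match branch fires and emits elemAt i
        have hmatch : PySem.List.pyGetD doc_ids (i : Int) "" = doc_id := by
          rw [hid]; rfl
        have hsle : startF doc_ids i ≤ i := startF_le doc_ids i
        have harg : (i : Int) - min n window
            = max ((startF doc_ids i : Nat) : Int) ((i : Int) - window) := by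
          rw [hn]; omega
        rw [addCtxLoop, if_pos hiInt, if_pos hmatch]
        have hstep : addCtxLoop orig_txt context doc_ids window f ((i : Int) + 1) (n + 1) doc_id
              (acc ++ [PySem.Str.join " " (PySem.List.slice context (some ((i : Int) - min n window)) (some (i : Int)) ++ [PySem.List.pyGetD orig_txt (i : Int) ""])])
            = (acc ++ [elemAt orig_txt context doc_ids window i])
              ++ (List.range' (i + 1) (orig_txt.length - (i + 1))).map (elemAt orig_txt context doc_ids window) := by
          have hcast : ((i : Int) + 1) = ((i + 1 : Nat) : Int) := by push_cast; omega
          rw [harg, hcast]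
          have helem : PySem.Str.join " " (PySem.List.slice context (some (max ((startF doc_ids i : Nat) : Int) ((i : Int) - window))) (some (i : Int)) ++ [PySem.List.pyGetD orig_txt (i : Int) ""]) = elemAt orig_txt context doc_ids window i := rfl
          rw [helem]
          apply ih (i + 1) (n + 1) doc_id _ (by omega)
          by_cases hnext : idAt doc_ids (i + 1) = idAt doc_ids i
          · left
            refine ⟨by rw [hid, ← hnext], ?_, by omega⟩
            have : startF doc_ids (i + 1) = startF doc_ids i := by
              rw [startF, if_pos hnext]
            rw [this, hn]; push_cast; omega
          · right
            exact ⟨by omega, by simpa using hid, by rw [hid]; exact fun h => hnext h.symm, by omega⟩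
        rw [hstep]
        have hrange : orig_txt.length - i = (orig_txt.length - (i + 1)) + 1 := by omega
        rw [hrange, List.range'_succ, List.map_cons]
        simp
      · -- mismatch: the else branch resets doc_id and n
        have hne' : ¬ (PySem.List.pyGetD doc_ids (i : Int) "" = doc_id) := by
          intro h; exact hne (by rw [← h]; rfl)
        rw [addCtxLoop, if_pos hiInt, if_neg hne']
        apply ih i 0 _ acc hle
        left
        refine ⟨rfl, ?_, by omega⟩
        have hstart : startF doc_ids i = i := by
          cases i with
          | zero => omega
          | succ j =>
            rw [startF, if_neg]
            intro h
            exact hne (by rw [hid]; simpa using h.symm)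
        rw [hstart]; omega
    · have hiInt : ¬ ((i : Int) < (orig_txt.length : Int)) := by exact_mod_cast hi
      rw [addCtxLoop, if_neg hiInt]
      have : orig_txt.length - i = 0 := by omega
      rw [this]
      simp

-- ===== VERDICT (by name: the statement is the Claim_ definition above) =====
theorem add_context_spec : Claim_equal_add_context := by
  intro orig_txt context doc_ids window _ _
  unfold Spec_add_context
  unfold add_context
  rw [alt_eq_map, List.range_eq_range']
  have h := loopA_eq orig_txt context doc_ids window (2 * orig_txt.length + 1) 0 0
    (PySem.List.pyGetD doc_ids 0 "") [] (by omega)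
    (Or.inl ⟨rfl, by simp [startF], by omega⟩)
  simpa using h
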